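-- pv_equiv track=rewrite | github.com/igijarosz/Krypto-temp | Macierzowy_spiralny.py | matrix_fill
-- ===== SOURCE A (Python) =====
-- def matrix_fill(text, rows, cols):
--     """Fills a matrix in a row by row way, for encryption purposes"""
--     matrix = [['' for _ in range(cols)] for _ in range(rows)]
--     index = 0
--
--     for r in range(rows):
--         for c in range(cols):
--             if index < len(text):
--                 matrix[r][c] = text[index]
--             else:
--                 matrix[r][c] = 'X'
--             index += 1
--
--     return matrix
-- ===== SOURCE B (Python) =====
-- def matrix_fill(text, rows, cols):
--     """Fills a matrix in a row by row way, for encryption purposes"""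
--     n = max(rows, 0) * max(cols, 0)
--     flat = list(text[:n]) + ['X'] * (n - len(text))
--     return [[flat[r * cols + c] for c in range(cols)] for r in range(rows)]
-- ===== Notes on version B (the rewrite author's own statement) =====
-- stated objective: simpler
-- what changed: Replaces A's pre-built mutable matrix, nested per-cell loops and running index counter with a pad-then-reshape decomposition: build the padded flat cell list once (text prefix plus 'X' padding), then lay it out row by row.
import Mathlib
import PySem

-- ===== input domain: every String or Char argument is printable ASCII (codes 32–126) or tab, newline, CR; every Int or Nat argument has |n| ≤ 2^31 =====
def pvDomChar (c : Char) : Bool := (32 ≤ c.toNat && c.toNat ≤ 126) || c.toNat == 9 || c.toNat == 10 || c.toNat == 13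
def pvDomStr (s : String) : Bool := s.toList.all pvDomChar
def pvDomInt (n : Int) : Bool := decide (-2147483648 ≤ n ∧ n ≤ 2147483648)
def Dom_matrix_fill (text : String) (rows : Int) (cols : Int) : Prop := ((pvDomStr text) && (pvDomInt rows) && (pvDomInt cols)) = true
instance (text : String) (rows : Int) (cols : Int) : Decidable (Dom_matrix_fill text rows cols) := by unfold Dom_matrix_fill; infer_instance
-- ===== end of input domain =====

-- B replaces A's mutable matrix + running index counter by a pad-then-reshape decomposition
-- (build the padded flat cell list once, then lay it out row by row); objective: simpler.

-- ===== PORT A =====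
def matrix_fill (text : String) (rows : Int) (cols : Int) : List (List String) :=
  let matrix : List (List String) :=
    (PySem.List.pyRange 0 rows 1).map (fun _ =>
      (PySem.List.pyRange 0 cols 1).map (fun _ => ""))
  let st :=
    (PySem.List.pyRange 0 rows 1).foldl (fun st r =>
      (PySem.List.pyRange 0 cols 1).foldl (fun (st2 : List (List String) × Int) c =>
        let v : String :=
          if st2.2 < PySem.Str.len text then
            -- text[index]: the guard ensures the index is in range, so pyGetD is exact
            String.ofList [PySem.List.pyGetD text.toList st2.2 'X']
          else "X"
        (st2.1.modify r.toNat (fun row => row.set c.toNat v), st2.2 + 1)) st)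
      (matrix, (0 : Int))
  st.1

-- ===== PORT B =====
def matrix_fill_alt (text : String) (rows : Int) (cols : Int) : List (List String) :=
  let n : Int := max rows 0 * max cols 0
  let flat : List String :=
    (PySem.List.slice text.toList none (some n)).map (fun ch => String.ofList [ch])
      ++ List.replicate (n - PySem.Str.len text).toNat "X"
  (PySem.List.pyRange 0 rows 1).map (fun r =>
    (PySem.List.pyRange 0 cols 1).map (fun c =>
      -- flat[r*cols + c]: always in range when the comprehension runs, so pyGetD is exact
      PySem.List.pyGetD flat (r * cols + c) "X"))

-- ===== PRECONDITION & SPEC =====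
def Spec_matrix_fill (text : String) (rows : Int) (cols : Int) (out : List (List String)) : Prop := out = matrix_fill_alt text rows cols
instance (text : String) (rows : Int) (cols : Int) (out : List (List String)) : Decidable (Spec_matrix_fill text rows cols out) := by unfold Spec_matrix_fill; infer_instance

-- ===== CLAIM (what is proved, stated in full; the proofs are below) =====
def Claim_equal_matrix_fill : Prop := ∀ (text : String) (rows : Int) (cols : Int), Dom_matrix_fill text rows cols → Spec_matrix_fill text rows cols (matrix_fill text rows cols)

-- ===== LEMMAS AND PROOFS =====

-- the value A writes into the cell with running index i
def pvVal (tl : List Char) (i : Int) : String :=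
  if i < (tl.length : Int) then String.ofList [PySem.List.pyGetD tl i 'X'] else "X"

theorem pv_inner (tl : List Char) (rn : Nat) :
    ∀ (C : Nat) (m : List (List String)) (i0 : Int),
    (List.range C).foldl (fun (st2 : List (List String) × Int) (c : Nat) =>
        (st2.1.modify rn (fun row => row.set c (pvVal tl st2.2)), st2.2 + 1)) (m, i0)
    = ((List.range C).foldl (fun mm (c : Nat) =>
          mm.modify rn (fun row => row.set c (pvVal tl (i0 + c)))) m, i0 + C) := by
  intro C
  induction C with
  | zero => intro m i0; simp
  | succ k ih =>
    intro m i0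
    simp only [List.range_succ, List.foldl_append, List.foldl_cons, List.foldl_nil, ih,
      Prod.mk.injEq]
    exact ⟨trivial, by push_cast; ring⟩

theorem pv_modify_modify {α : Type} (n : Nat) (f g : α → α) :
    ∀ (m : List α), (m.modify n f).modify n g = m.modify n (fun a => g (f a)) := by
  induction n with
  | zero => intro m; cases m <;> simp [List.modify_cons]
  | succ k ih => intro m; cases m <;> simp [ih]

theorem pv_modify_fold {α : Type} (rn : Nat) (h : Nat → α → α) :
    ∀ (C : Nat) (m : List α),
    (List.range C).foldl (fun mm c => mm.modify rn (h c)) m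
    = m.modify rn (fun a => (List.range C).foldl (fun a c => h c a) a) := by
  intro C
  induction C with
  | zero => intro m; simp [show (fun (a : α) => a) = id from rfl]
  | succ k ih => intro m; simp [List.range_succ, ih, pv_modify_modify]

theorem pv_sets_eq (v : Nat → String) :
    ∀ (C : Nat) (row : List String), C ≤ row.length →
    (List.range C).foldl (fun row c => row.set c (v c)) row
    = (List.range C).map v ++ row.drop C := by
  intro C
  induction C with
  | zero => intro row _; simp
  | succ k ih =>
    intro row hlen
    have hk : k < row.length := by omega
    simp only [List.range_succ, List.foldl_append, List.foldl_cons, List.foldl_nil,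
      List.map_append, List.map_cons, List.map_nil, ih row (by omega)]
    rw [List.set_append_right _ _ (by simp)]
    have h0 : k - (List.map v (List.range k)).length = 0 := by simp
    rw [h0, List.drop_eq_getElem_cons hk, List.set_cons_zero, List.append_assoc]
    rfl

theorem pv_modify_append {α : Type} (xs : List α) (y : α) (ys : List α) (f : α → α) :
    (xs ++ y :: ys).modify xs.length f = xs ++ f y :: ys := by
  induction xs with
  | nil => simp [List.modify_cons]
  | cons a as ih => simp [ih]

theorem pv_outer (tl : List Char) (C R0 : Nat) :
    ∀ (Rk : Nat), Rk ≤ R0 →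
    (List.range Rk).foldl (fun (st : List (List String) × Int) (rn : Nat) =>
        (List.range C).foldl (fun (st2 : List (List String) × Int) (c : Nat) =>
          (st2.1.modify rn (fun row => row.set c (pvVal tl st2.2)), st2.2 + 1)) st)
      (List.replicate R0 (List.replicate C ""), 0)
    = ((List.range Rk).map (fun (rn : Nat) => (List.range C).map
          (fun (c : Nat) => pvVal tl ((rn : Int) * (C : Int) + (c : Int))))
        ++ List.replicate (R0 - Rk) (List.replicate C ""), (Rk : Int) * (C : Int)) := by
  intro Rk
  induction Rk with
  | zero => intro _; simp
  | succ j ih =>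
    intro hle
    rw [List.range_succ, List.foldl_append, List.foldl_cons, List.foldl_nil, ih (by omega)]
    rw [pv_inner, pv_modify_fold]
    have hrep : List.replicate (R0 - j) (List.replicate C "") =
        List.replicate C "" :: List.replicate (R0 - (j + 1)) (List.replicate C "") := by
      rw [← List.replicate_succ]
      congr 1
      omega
    rw [hrep]
    have hplen : ((List.range j).map (fun (rn : Nat) =>
        (List.range C).map (fun (c : Nat) =>
          pvVal tl ((rn : Int) * (C : Int) + (c : Int))))).length = j := by simp
    have hmod := pv_modify_append
      ((List.range j).map (fun (rn : Nat) => (List.range C).map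
        (fun (c : Nat) => pvVal tl ((rn : Int) * (C : Int) + (c : Int)))))
      (List.replicate C "") (List.replicate (R0 - (j + 1)) (List.replicate C ""))
      (fun a => (List.range C).foldl (fun a c => a.set c (pvVal tl ((j : Int) * C + c))) a)
    rw [hplen] at hmod
    rw [hmod]
    rw [pv_sets_eq _ C _ (by simp)]
    simp only [List.drop_replicate, Nat.sub_self, List.replicate_zero, List.append_nil]
    simp only [Prod.mk.injEq]
    refine ⟨?_, by push_cast; ring⟩
    rw [List.map_append, List.append_assoc]
    rfl

theorem pv_flat_get (tl : List Char) (N k : Nat) (hk : k < N) :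
    PySem.List.pyGetD
      ((tl.take N).map (fun ch => String.ofList [ch]) ++ List.replicate (N - tl.length) "X")
      (k : Int) "X" = pvVal tl k := by
  rw [PySem.List.pyGetD_natCast]
  by_cases hL : k < tl.length
  · have hlen : k < ((tl.take N).map (fun ch => String.ofList [ch])).length := by
      simp; omega
    rw [List.getD_eq_getElem?_getD, List.getElem?_append_left hlen]
    simp [pvVal, hL, hk]
  · have hpre : ((tl.take N).map (fun ch => String.ofList [ch])).length = tl.length := by
      simp; omega
    rw [List.getD_eq_getElem?_getD, List.getElem?_append_right (by omega)]
    rw [hpre]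
    have : k - tl.length < N - tl.length := by omega
    simp [pvVal, hL, this]

-- ===== VERDICT (by name: the statement is the Claim_ definition above) =====
theorem matrix_fill_spec : Claim_equal_matrix_fill := by
  intro text rows cols _
  unfold Spec_matrix_fill matrix_fill matrix_fill_alt
  by_cases hr : rows ≤ 0
  · simp [PySem.List.pyRange_one_eq_nil hr]
  · by_cases hc : cols ≤ 0
    · simp [PySem.List.pyRange_one_eq_nil hc]
    · rw [not_le] at hr hc
      lift rows to Nat using hr.le with R
      lift cols to Nat using hc.le with C
      simp only [PySem.List.pyRange_one, zero_add, Int.sub_zero, Int.toNat_natCast,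
        List.foldl_map, List.map_map, Function.comp_def, PySem.Str.len_eq]
      have hinit : (List.range R).map (fun _ => (List.range C).map (fun _ => "")) =
          List.replicate R (List.replicate C "") := by
        simp [List.map_const']
      rw [hinit]
      refine Eq.trans (congrArg Prod.fst (pv_outer text.toList C R R le_rfl)) ?_
      simp only [Nat.sub_self, List.replicate_zero, List.append_nil]
      rw [show max ((R : Int)) 0 = (R : Int) from max_eq_left hr.le,
        show max ((C : Int)) 0 = (C : Int) from max_eq_left hc.le]
      have hs : PySem.List.slice text.toList none (some ((R : Int) * C))
          = text.toList.take (((R : Int)) * C).toNat := by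
        apply PySem.List.slice_to
        positivity
      rw [hs]
      have h1 : (((R : Int)) * C).toNat = R * C := by
        rw [← Nat.cast_mul, Int.toNat_natCast]
      have h2 : (((R : Int)) * C - (text.toList.length : Int)).toNat
          = R * C - text.toList.length := by
        rw [← Nat.cast_mul]
        exact Int.toNat_sub _ _
      rw [h1, h2]
      refine List.map_congr_left (fun rn hrn => ?_)
      refine List.map_congr_left (fun c hc' => ?_)
      rw [List.mem_range] at hrn hc'
      have hcast : ((rn : Int)) * C + c = ((rn * C + c : Nat) : Int) := by push_cast; ring
      have hk : rn * C + c < R * C := by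
        have h3 : (rn + 1) * C ≤ R * C := Nat.mul_le_mul_right C hrn
        have h4 : rn * C + c < (rn + 1) * C := by rw [Nat.succ_mul]; omega
        omega
      rw [hcast]
      exact (pv_flat_get text.toList (R * C) (rn * C + c) hk).symm
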